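-- pv_equiv track=rewrite | github.com/osalbahr/coding-puzzles | kattis/problems/old/anagramcounting/anagramcounting.py | solve
-- ===== SOURCE A (Python) =====
-- import math
--
-- def solve( s ):
--     myDict = {}
--     for i in range( len( s ) ):
--         c = s[ i ]
--         if ( c not in myDict ):
--             myDict[ c ] = 1
--         else:
--             myDict[ c ] = myDict[ c ] + 1
--     result = math.factorial( len( s ) )
--     for x in myDict.values():
--         result = result // math.factorial( x )
--
--     return result
-- ===== SOURCE B (Python) =====
-- import math
--
-- def solve(s):
--     # Same multiset counting, but the multinomial is built as a running product
--     # of binomial coefficients instead of dividing factorials.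
--     counts = {}
--     for c in s:
--         counts[c] = counts.get(c, 0) + 1
--     t = 0
--     result = 1
--     for c in counts.values():
--         t += c
--         result *= math.comb(t, c)
--     return result
-- ===== Notes on version B (the rewrite author's own statement) =====
-- stated objective: alternative
-- what changed: A computes the factorial of the whole length and then repeatedly floor-divides it by the factorial of each character count; B instead keeps a running total t of counts and multiplies binomial coefficients comb(t, c), never forming the full-length factorial.
import Mathlib
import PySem

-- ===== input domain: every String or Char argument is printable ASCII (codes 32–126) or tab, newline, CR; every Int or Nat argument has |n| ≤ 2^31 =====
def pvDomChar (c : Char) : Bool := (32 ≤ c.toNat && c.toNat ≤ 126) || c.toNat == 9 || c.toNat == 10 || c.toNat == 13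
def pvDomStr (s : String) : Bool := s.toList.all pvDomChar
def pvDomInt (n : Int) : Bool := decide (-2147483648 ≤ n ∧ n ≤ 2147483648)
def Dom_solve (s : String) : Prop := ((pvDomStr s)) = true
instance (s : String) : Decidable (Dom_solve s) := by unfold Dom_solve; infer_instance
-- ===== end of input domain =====

-- B computes the same multinomial as a running product of binomials instead of dividing factorials (alternative decomposition, exact equivalence).

-- ===== PORT A =====
-- math.factorial(n); A only applies it to nonnegative arguments (a length and positive counts), where this is exact
def pyFactorial (n : Int) : Int := ((Nat.factorial n.toNat : Nat) : Int)

def solve (s : String) : Int :=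
  let myDict : PySem.Dict Char Int :=
    (PySem.List.pyRange 0 (PySem.Str.len s)).foldl
      (fun (d : PySem.Dict Char Int) i =>
        let c := PySem.List.pyGetD s.toList i ' '   -- s[i]; i ranges over range(len(s)), always in range
        if d.contains c = false then
          d.insert c 1
        else
          d.insert c ((d.get? c).getD 0 + 1))       -- myDict[c] + 1; key is present in this branch
      PySem.Dict.empty
  myDict.values.foldl
    (fun result x => PySem.Int.floordiv result (pyFactorial x))
    (pyFactorial (PySem.Str.len s))

-- ===== PORT B =====
-- math.comb(n, k); B only applies it with 0 ≤ k ≤ n, where this is exact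
def pyComb (n k : Int) : Int := ((Nat.choose n.toNat k.toNat : Nat) : Int)

def solve_alt (s : String) : Int :=
  let counts : PySem.Dict Char Int :=
    s.toList.foldl (fun (d : PySem.Dict Char Int) c => d.insert c (d.getD c 0 + 1))
      PySem.Dict.empty
  let p := counts.values.foldl
    (fun (p : Int × Int) c => (p.1 + c, p.2 * pyComb (p.1 + c) c)) (0, 1)
  p.2

-- ===== PRECONDITION & SPEC =====
def Spec_solve (s : String) (out : Int) : Prop := out = solve_alt s
instance (s : String) (out : Int) : Decidable (Spec_solve s out) := by unfold Spec_solve; infer_instance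

-- ===== CLAIM (what is proved, stated in full; the proofs are below) =====
def Claim_equal_solve : Prop := ∀ (s : String), Dom_solve s → Spec_solve s (solve s)

-- ===== LEMMAS AND PROOFS =====

-- A's counting loop body is B's counting loop body
lemma count_body_eq (d : PySem.Dict Char Int) (c : Char) :
    (if d.contains c = false then d.insert c 1 else d.insert c ((d.get? c).getD 0 + 1))
      = d.insert c (d.getD c 0 + 1) := by
  rw [PySem.Dict.getD_eq_get?_getD]
  by_cases h : d.contains c = false
  · simp [h, (PySem.Dict.get?_eq_none_iff_contains d c).mpr h]
  · simp [h]

-- Both ports build Counter(s)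
lemma dict_A_eq_counter (s : String) :
    (PySem.List.pyRange 0 (PySem.Str.len s)).foldl
      (fun (d : PySem.Dict Char Int) i =>
        let c := PySem.List.pyGetD s.toList i ' '
        if d.contains c = false then d.insert c 1 else d.insert c ((d.get? c).getD 0 + 1))
      PySem.Dict.empty = PySem.Dict.counter s.toList := by
  have hlen : PySem.Str.len s = PySem.List.len s.toList := by
    simp [PySem.Str.len, PySem.List.len]
  rw [hlen]
  have hmap := PySem.List.map_pyGetD_pyRange_zero s.toList ' '
  calc (PySem.List.pyRange 0 (PySem.List.len s.toList)).foldl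
        (fun (d : PySem.Dict Char Int) i =>
          let c := PySem.List.pyGetD s.toList i ' '
          if d.contains c = false then d.insert c 1 else d.insert c ((d.get? c).getD 0 + 1))
        PySem.Dict.empty
      = ((PySem.List.pyRange 0 (PySem.List.len s.toList)).map
          (fun j => PySem.List.pyGetD s.toList j ' ')).foldl
        (fun (d : PySem.Dict Char Int) c =>
          if d.contains c = false then d.insert c 1 else d.insert c ((d.get? c).getD 0 + 1))
        PySem.Dict.empty := by rw [List.foldl_map]
    _ = s.toList.foldl
        (fun (d : PySem.Dict Char Int) c =>
          if d.contains c = false then d.insert c 1 else d.insert c ((d.get? c).getD 0 + 1))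
        PySem.Dict.empty := by rw [hmap]
    _ = s.toList.foldl (fun (d : PySem.Dict Char Int) c => d.insert c (d.getD c 0 + 1))
        PySem.Dict.empty := by
          exact List.foldl_ext _ _ _ (fun d c _ => count_body_eq d c)
    _ = PySem.Dict.counter s.toList := PySem.Dict.foldl_insert_getD_add_one_eq_counter s.toList

lemma dict_B_eq_counter (s : String) :
    s.toList.foldl (fun (d : PySem.Dict Char Int) c => d.insert c (d.getD c 0 + 1))
      PySem.Dict.empty = PySem.Dict.counter s.toList :=
  PySem.Dict.foldl_insert_getD_add_one_eq_counter s.toList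

-- values of Counter(l) are the counts of the distinct elements, in first-occurrence order
lemma values_counter (l : List Char) :
    (PySem.Dict.counter l).values
      = ((PySem.Set.ofList l).map (fun k => l.count k)).map (fun (c : Nat) => (c : Int)) := by
  show ((PySem.Dict.counter l).items).map (·.2) = _
  rw [PySem.Dict.items_counter]
  simp [List.map_map, Function.comp]

-- the counts of the distinct elements sum to the length
lemma sum_counts (l : List Char) :
    ((PySem.Set.ofList l).map (fun k => l.count k)).sum = l.length := by
  have hperm : (PySem.Set.ofList l).Perm l.dedup := by
    apply List.perm_of_nodup_nodup_toFinset_eq (PySem.Set.nodup_ofList l) l.nodup_dedup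
    ext x
    simp [PySem.Set.mem_ofList]
  calc ((PySem.Set.ofList l).map (fun k => l.count k)).sum
      = ((l.dedup).map (fun k => l.count k)).sum := (hperm.map _).sum_eq
    _ = l.length := List.sum_map_count_dedup_eq_length l

-- A's fold over casted counts computes in Nat
lemma A_cast (cs : List Nat) (m : Nat) :
    (cs.map (fun (c : Nat) => (c : Int))).foldl
      (fun result x => PySem.Int.floordiv result (pyFactorial x)) ((m : Nat) : Int)
    = ((cs.foldl (fun r c => r / c.factorial) m : Nat) : Int) := by
  induction cs generalizing m with
  | nil => rfl
  | cons c cs ih =>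
    simp only [List.map_cons, List.foldl_cons]
    have pf : pyFactorial ((c : Nat) : Int) = ((c.factorial : Nat) : Int) := by
      simp [pyFactorial]
    rw [pf, PySem.Int.floordiv_natCast, ih]

-- B's fold over casted counts computes in Nat
lemma B_cast (cs : List Nat) (t r : Nat) :
    (cs.map (fun (c : Nat) => (c : Int))).foldl
      (fun (p : Int × Int) c => (p.1 + c, p.2 * pyComb (p.1 + c) c)) (((t : Nat) : Int), ((r : Nat) : Int))
    = ((((cs.foldl (fun (p : Nat × Nat) c => (p.1 + c, p.2 * (p.1 + c).choose c)) (t, r)).1 : Nat) : Int),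
       (((cs.foldl (fun (p : Nat × Nat) c => (p.1 + c, p.2 * (p.1 + c).choose c)) (t, r)).2 : Nat) : Int)) := by
  induction cs generalizing t r with
  | nil => rfl
  | cons c cs ih =>
    simp only [List.map_cons, List.foldl_cons]
    have h2 : pyComb (((t : Nat) : Int) + ((c : Nat) : Int)) ((c : Nat) : Int)
        = (((t + c).choose c : Nat) : Int) := by
      have ht : (((t : Nat) : Int) + ((c : Nat) : Int)).toNat = t + c := by omega
      simp [pyComb, ht]
    have h1 : ((t : Nat) : Int) + ((c : Nat) : Int) = (((t + c : Nat) : Nat) : Int) := by push_cast; ring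
    rw [h2, h1, ← Int.natCast_mul, ih]

-- sequential floor division by factorials is division by the product
lemma natA (cs : List Nat) (m : Nat) :
    cs.foldl (fun r c => r / c.factorial) m = m / (cs.map Nat.factorial).prod := by
  induction cs generalizing m with
  | nil => simp
  | cons c cs ih => simp [List.foldl_cons, ih, Nat.div_div_eq_div_mul]

-- invariant of B's binomial-product fold
lemma natB (cs : List Nat) (t r : Nat) :
    (cs.foldl (fun (p : Nat × Nat) c => (p.1 + c, p.2 * (p.1 + c).choose c)) (t, r)).2
      * (t.factorial * (cs.map Nat.factorial).prod)
    = r * (t + cs.sum).factorial := by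
  induction cs generalizing t r with
  | nil => simp
  | cons c cs ih =>
    simp only [List.foldl_cons, List.map_cons, List.prod_cons, List.sum_cons]
    have key : (t + c).choose c * c.factorial * t.factorial = (t + c).factorial := by
      have h := Nat.choose_mul_factorial_mul_factorial (show c ≤ t + c by omega)
      simpa using h
    have hch : 0 < (t + c).choose c := Nat.choose_pos (by omega)
    have := ih (t + c) (r * (t + c).choose c)
    apply Nat.eq_of_mul_eq_mul_left hch
    calc (t + c).choose c
          * ((cs.foldl (fun (p : Nat × Nat) c => (p.1 + c, p.2 * (p.1 + c).choose c))
              (t + c, r * (t + c).choose c)).2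
            * (t.factorial * (c.factorial * (cs.map Nat.factorial).prod)))
        = (cs.foldl (fun (p : Nat × Nat) c => (p.1 + c, p.2 * (p.1 + c).choose c))
              (t + c, r * (t + c).choose c)).2
            * ((t + c).choose c * c.factorial * t.factorial * (cs.map Nat.factorial).prod) := by ring
      _ = (cs.foldl (fun (p : Nat × Nat) c => (p.1 + c, p.2 * (p.1 + c).choose c))
              (t + c, r * (t + c).choose c)).2
            * ((t + c).factorial * (cs.map Nat.factorial).prod) := by rw [key]
      _ = r * (t + c).choose c * (t + c + cs.sum).factorial := by
            rw [← Nat.mul_assoc] at this ⊢; exact this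
      _ = (t + c).choose c * (r * (t + (c + cs.sum)).factorial) := by
            ring_nf

-- the two Nat computations agree
lemma nat_main (cs : List Nat) :
    cs.foldl (fun r c => r / c.factorial) cs.sum.factorial
    = (cs.foldl (fun (p : Nat × Nat) c => (p.1 + c, p.2 * (p.1 + c).choose c)) (0, 1)).2 := by
  have hB := natB cs 0 1
  simp only [Nat.factorial_zero, Nat.one_mul, Nat.zero_add] at hB
  rw [natA]
  have hpos : 0 < (cs.map Nat.factorial).prod :=
    List.prod_pos (by intro x hx; simp only [List.mem_map] at hx
                      obtain ⟨c, _, rfl⟩ := hx; exact c.factorial_pos)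
  exact Nat.div_eq_of_eq_mul_left hpos hB.symm

-- ===== VERDICT (by name: the statement is the Claim_ definition above) =====
theorem solve_spec : Claim_equal_solve := by
  intro s _
  show solve s = solve_alt s
  set l := s.toList with hl
  have hslen : PySem.Str.len s = ((l.length : Nat) : Int) := by
    simp [PySem.Str.len, hl]
  simp only [solve, solve_alt]
  rw [dict_A_eq_counter, dict_B_eq_counter, values_counter, hslen]
  set cs : List Nat := (PySem.Set.ofList l).map (fun k => l.count k) with hcs
  have hsum : cs.sum = l.length := sum_counts l
  rw [show pyFactorial ((l.length : Nat) : Int) = ((l.length.factorial : Nat) : Int) by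
        simp [pyFactorial]]
  rw [A_cast cs l.length.factorial]
  rw [show ((0 : Int), (1 : Int)) = (((0 : Nat) : Int), ((1 : Nat) : Int)) by norm_num]
  rw [B_cast cs 0 1]
  rw [← hsum, nat_main]
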